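-- pv_equiv track=rewrite | github.com/haimavni/place_stories_server | modules/topics_support.py | combined_usage
-- ===== SOURCE A (Python) =====
-- def combined_usage(uc):
--     usage = ''
--     for u in uc:
--         for c in u:
--             if c not in usage:
--                 usage += c
--     usage = sorted(usage)
--     usage = ''.join(usage)
--     return usage
-- ===== SOURCE B (Python) =====
-- def combined_usage(uc):
--     chars = sorted([c for u in uc for c in u])
--     out = []
--     prev = None
--     for c in chars:
--         if prev is None or c != prev:
--             out.append(c)
--         prev = c
--     return ''.join(out)
-- ===== Notes on version B (the rewrite author's own statement) =====
-- stated objective: alternative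
-- what changed: Replaced A's incremental membership-scan accumulation followed by a final sort with flatten-all-characters, sort once, then a single linear pass keeping each character only when it differs from the previously kept one.
import Mathlib
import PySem

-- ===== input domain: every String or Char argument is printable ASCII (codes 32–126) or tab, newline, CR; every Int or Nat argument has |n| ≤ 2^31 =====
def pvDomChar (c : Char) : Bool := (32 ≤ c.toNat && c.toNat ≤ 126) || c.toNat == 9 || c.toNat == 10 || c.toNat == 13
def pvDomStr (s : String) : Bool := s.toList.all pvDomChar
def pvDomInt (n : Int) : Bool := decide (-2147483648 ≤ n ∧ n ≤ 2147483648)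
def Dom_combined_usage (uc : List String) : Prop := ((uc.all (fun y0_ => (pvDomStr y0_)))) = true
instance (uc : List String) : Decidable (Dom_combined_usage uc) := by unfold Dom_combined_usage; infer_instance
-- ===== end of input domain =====

-- B replaces A's grow-a-unique-accumulator-with-membership-scans by flatten, sort once,
-- then one adjacent-dedup pass tracking only the previous character (alternative algorithm).

-- ===== PORT A =====
-- A accumulates unseen characters (single-char 'c not in usage' = char membership), then sorts.
def combined_usage (uc : List String) : String :=
  let usage : List Char :=
    uc.foldl (fun usage u =>
      u.toList.foldl (fun us c => if c ∈ us then us else us ++ [c]) usage) []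
  String.mk (PySem.List.sorted usage (fun x => x) false)

-- ===== PORT B =====
-- the prev-tracking dedup loop of Source B (prev = none before the first kept character)
def cuDedupLoop : Option Char → List Char → List Char
  | _, [] => []
  | none, c :: t => c :: cuDedupLoop (some c) t
  | some p, c :: t => if c = p then cuDedupLoop (some p) t else c :: cuDedupLoop (some c) t

def combined_usage_alt (uc : List String) : String :=
  let chars := PySem.List.sorted (uc.flatMap (fun u => u.toList)) (fun x => x) false
  String.mk (cuDedupLoop none chars)

-- ===== PRECONDITION & SPEC =====
def Spec_combined_usage (uc : List String) (out : String) : Prop := out = combined_usage_alt uc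
instance (uc : List String) (out : String) : Decidable (Spec_combined_usage uc out) := by unfold Spec_combined_usage; infer_instance

-- ===== CLAIM (what is proved, stated in full; the proofs are below) =====
def Claim_equal_combined_usage : Prop := ∀ (uc : List String), Dom_combined_usage uc → Spec_combined_usage uc (combined_usage uc)

-- ===== LEMMAS AND PROOFS =====

-- A's nested fold is the single fold over the flattened character list
theorem cu_fold_flat (uc : List String) (acc : List Char) :
    uc.foldl (fun usage u =>
      u.toList.foldl (fun us c => if c ∈ us then us else us ++ [c]) usage) acc
    = (uc.flatMap (fun u => u.toList)).foldl
        (fun us c => if c ∈ us then us else us ++ [c]) acc := by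
  induction uc generalizing acc with
  | nil => rfl
  | cons u t ih => simp [List.flatMap_cons, List.foldl_append, ih]

-- invariant of A's accumulator: nodup, membership = acc ∪ input
theorem cu_acc_inv (l : List Char) (acc : List Char) (hnd : acc.Nodup) :
    (l.foldl (fun us c => if c ∈ us then us else us ++ [c]) acc).Nodup ∧
    (∀ x, x ∈ l.foldl (fun us c => if c ∈ us then us else us ++ [c]) acc ↔ x ∈ acc ∨ x ∈ l) := by
  induction l generalizing acc with
  | nil => simp [hnd]
  | cons c t ih =>
    simp only [List.foldl_cons]
    by_cases hc : c ∈ acc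
    · simp only [if_pos hc]
      obtain ⟨h1, h2⟩ := ih acc hnd
      refine ⟨h1, fun x => ?_⟩
      rw [h2]
      simp only [List.mem_cons]
      constructor
      · rintro (h | h) <;> tauto
      · rintro (h | rfl | h) <;> tauto
    · simp only [if_neg hc]
      have hnd' : (acc ++ [c]).Nodup := by
        simp only [List.nodup_append, List.nodup_cons, List.not_mem_nil, not_false_iff,
          List.nodup_nil, and_true]
        refine ⟨hnd, trivial, ?_⟩
        intro a ha b hb
        simp only [List.mem_singleton] at hb
        subst hb
        exact fun he => hc (he ▸ ha)
      obtain ⟨h1, h2⟩ := ih (acc ++ [c]) hnd'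
      refine ⟨h1, fun x => ?_⟩
      rw [h2]
      simp only [List.mem_append, List.mem_cons]
      tauto

-- the dedup pass on a ≤-sorted list whose elements all dominate p: strictly sorted, drops exactly p
theorem cuDedup_some (l : List Char) (p : Char)
    (hs : l.Pairwise (· ≤ ·)) (hp : ∀ x ∈ l, p ≤ x) :
    (cuDedupLoop (some p) l).Pairwise (· < ·) ∧
    (∀ x, x ∈ cuDedupLoop (some p) l ↔ x ∈ l ∧ x ≠ p) := by
  induction l generalizing p with
  | nil => simp [cuDedupLoop]
  | cons c t ih =>
    have hpc : p ≤ c := hp c (List.mem_cons_self)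
    have hct : ∀ x ∈ t, c ≤ x := fun x hx => (List.pairwise_cons.mp hs).1 x hx
    have hst : t.Pairwise (· ≤ ·) := (List.pairwise_cons.mp hs).2
    by_cases hcp : c = p
    · simp only [cuDedupLoop, if_pos hcp]
      obtain ⟨h1, h2⟩ := ih p hst (fun x hx => le_trans hpc (hcp ▸ hct x hx))
      refine ⟨h1, fun x => ?_⟩
      rw [h2]
      subst hcp
      simp only [List.mem_cons]
      constructor
      · rintro ⟨hx, hxc⟩; exact ⟨Or.inr hx, hxc⟩
      · rintro ⟨hx | hx, hxc⟩
        · exact absurd hx hxc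
        · exact ⟨hx, hxc⟩
    · simp only [cuDedupLoop, if_neg hcp]
      obtain ⟨h1, h2⟩ := ih c hst hct
      have hlt : ∀ x ∈ cuDedupLoop (some c) t, c < x := by
        intro x hx
        obtain ⟨hxt, hxc⟩ := (h2 x).mp hx
        exact lt_of_le_of_ne (hct x hxt) (Ne.symm hxc)
      refine ⟨List.pairwise_cons.mpr ⟨hlt, h1⟩, fun x => ?_⟩
      simp only [List.mem_cons, h2]
      constructor
      · rintro (rfl | ⟨hx, hxc⟩)
        · exact ⟨Or.inl rfl, hcp⟩
        · refine ⟨Or.inr hx, ?_⟩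
          have := lt_of_le_of_ne (hct x hx) (Ne.symm hxc)
          exact ne_of_gt (lt_of_le_of_lt hpc this)
      · rintro ⟨hx | hx, hxp⟩
        · exact Or.inl hx
        · by_cases hxc : x = c
          · exact Or.inl hxc
          · exact Or.inr ⟨hx, hxc⟩

theorem cuDedup_none (l : List Char) (hs : l.Pairwise (· ≤ ·)) :
    (cuDedupLoop none l).Pairwise (· < ·) ∧
    (∀ x, x ∈ cuDedupLoop none l ↔ x ∈ l) := by
  cases l with
  | nil => simp [cuDedupLoop]
  | cons c t =>
    have hct : ∀ x ∈ t, c ≤ x := fun x hx => (List.pairwise_cons.mp hs).1 x hx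
    have hst : t.Pairwise (· ≤ ·) := (List.pairwise_cons.mp hs).2
    obtain ⟨h1, h2⟩ := cuDedup_some t c hst hct
    have hlt : ∀ x ∈ cuDedupLoop (some c) t, c < x := by
      intro x hx
      obtain ⟨hxt, hxc⟩ := (h2 x).mp hx
      exact lt_of_le_of_ne (hct x hxt) (Ne.symm hxc)
    simp only [cuDedupLoop]
    refine ⟨List.pairwise_cons.mpr ⟨hlt, h1⟩, fun x => ?_⟩
    simp only [List.mem_cons, h2]
    constructor
    · rintro (rfl | ⟨hx, _⟩)
      · exact Or.inl rfl
      · exact Or.inr hx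
    · rintro (rfl | hx)
      · exact Or.inl rfl
      · by_cases hxc : x = c
        · exact Or.inl hxc
        · exact Or.inr ⟨hx, hxc⟩

-- ===== VERDICT (by name: the statement is the Claim_ definition above) =====
theorem combined_usage_spec : Claim_equal_combined_usage := by
  intro uc _
  unfold Spec_combined_usage combined_usage combined_usage_alt
  set L := uc.flatMap (fun u => u.toList) with hL
  obtain ⟨hnd, hmem⟩ := cu_acc_inv L [] List.nodup_nil
  set usage := L.foldl (fun us c => if c ∈ us then us else us ++ [c]) [] with husage
  set S := PySem.List.sorted L (fun x => x) false with hS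
  have hSs : S.Pairwise (· ≤ ·) := PySem.List.sorted_pairwise L (fun x => x)
  obtain ⟨hd1, hd2⟩ := cuDedup_none S hSs
  have hperm : (cuDedupLoop none S).Perm usage := by
    rw [List.perm_ext_iff_of_nodup hd1.nodup hnd]
    intro x
    rw [hd2 x, hmem x]
    simp [hS, PySem.List.mem_sorted]
  have hsort : PySem.List.sorted usage (fun x => x) false = cuDedupLoop none S :=
    PySem.List.sorted_eq_of_perm_of_pairwise_lt _ _ _ hperm hd1
  show String.mk (PySem.List.sorted
      (uc.foldl (fun usage u => u.toList.foldl (fun us c => if c ∈ us then us else us ++ [c]) usage) [])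
      (fun x => x) false) = String.mk (cuDedupLoop none S)
  rw [cu_fold_flat, ← husage, hsort]
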